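-- pv_equiv track=rewrite | github.com/Fondamenti18/fondamenti-di-programmazione | students/1742740/homework04/program01.py | trova
-- ===== SOURCE A (Python) =====
-- def trova(diz,x): #funzione che trova i nodi appartenenti al sottoalbero da cercare
--     diz2={}
--     if not x in diz:
--         return diz2
--     else:
--         list= diz.get(x)
--         diz2[x]=list
--         if len(list)>0:
--             for i in list:
--                 diz2.update(trova(diz,i))
--     return diz2
-- ===== SOURCE B (Python) =====
-- def trova(diz, x):  # iterative DFS with an explicit stack instead of recursion
--     diz2 = {}
--     stack = [x]
--     while stack:
--         node = stack.pop()
--         if node in diz: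
--             children = diz.get(node)
--             diz2[node] = children
--             stack.extend(reversed(children))
--     return diz2
-- ===== Notes on version B (the rewrite author's own statement) =====
-- stated objective: alternative
-- what changed: Replaced A's recursion with dict.update merging of child results by a single iterative explicit-stack DFS that writes each visited node straight into one output dict (children pushed in reverse so preorder/insertion order is preserved).
import Mathlib
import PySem

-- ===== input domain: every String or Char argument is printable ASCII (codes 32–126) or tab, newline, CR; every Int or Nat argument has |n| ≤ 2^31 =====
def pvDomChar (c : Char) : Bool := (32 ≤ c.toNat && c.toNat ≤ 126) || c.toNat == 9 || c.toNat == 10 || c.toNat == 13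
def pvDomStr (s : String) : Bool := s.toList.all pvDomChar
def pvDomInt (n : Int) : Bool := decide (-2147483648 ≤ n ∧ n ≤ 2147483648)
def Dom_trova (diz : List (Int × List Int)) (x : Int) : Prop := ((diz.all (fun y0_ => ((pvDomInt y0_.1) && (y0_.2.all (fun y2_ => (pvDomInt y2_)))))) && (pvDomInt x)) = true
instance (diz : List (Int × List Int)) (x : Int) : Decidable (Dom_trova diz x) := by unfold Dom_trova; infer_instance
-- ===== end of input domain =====

-- B changes the decomposition: an iterative explicit-stack DFS instead of A's recursion
-- with dict.update merging; return values only are compared (neither mutates its input).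

-- ===== PORT A =====
-- Recursive A with a fuel parameter: fuel (diz.length + 1) is proved sufficient under
-- Pre_trova (the recursion descends along paths of distinct keys); fuel 0 returns {}
-- only on inputs Pre_trova excludes (where the Python recursion does not return).
def trovaA (d : PySem.Dict Int (List Int)) : Nat → Int → PySem.Dict Int (List Int)
  | 0, _ => PySem.Dict.empty
  | f + 1, x =>
    if d.contains x then                                    -- if not x in diz: return {}
      let l := (d.get? x).getD []                           -- list = diz.get(x)  (present, so the default is never used)
      let diz2 := (PySem.Dict.empty.insert x l)             -- diz2[x] = list
      if l.length > 0 then                                  -- if len(list) > 0: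
        l.foldl (fun acc i => acc.update (trovaA d f i).items) diz2   -- diz2.update(trova(diz, i))
      else diz2
    else PySem.Dict.empty

def trova (diz : List (Int × List Int)) (x : Int) : List (Int × List Int) :=
  (trovaA (PySem.Dict.ofList diz) (diz.length + 1) x).items

-- ===== PORT B =====
-- The Python stack pops from the END and extends with reversed(children); the port
-- mirrors the stack (head = Python's last element), so pop = head, push = children ++ rest.
-- Fuel pvFuelB bounds the number of pops (proved sufficient under Pre_trova).
def trovaBLoop (d : PySem.Dict Int (List Int)) : Nat → List Int → PySem.Dict Int (List Int) → PySem.Dict Int (List Int)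
  | _, [], acc => acc                                       -- while stack: (empty → return diz2)
  | 0, _ :: _, acc => acc                                   -- fuel exhausted (unreachable under Pre_trova)
  | f + 1, node :: rest, acc =>
    if d.contains node then                                 -- if node in diz:
      let children := (d.get? node).getD []                 -- children = diz.get(node)
      trovaBLoop d f (children ++ rest) (acc.insert node children)  -- diz2[node] = children; stack.extend(reversed(children))
    else trovaBLoop d f rest acc

def pvFuelB (diz : List (Int × List Int)) : Nat :=
  ((diz.map (fun p => p.2.length)).sum + 2) ^ (diz.length + 2)

def trova_alt (diz : List (Int × List Int)) (x : Int) : List (Int × List Int) :=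
  (trovaBLoop (PySem.Dict.ofList diz) (pvFuelB diz) [x] PySem.Dict.empty).items

-- ===== PRECONDITION & SPEC =====
-- Reachability in the graph diz, computed as an iterated one-step closure; the
-- iteration count pvN suffices to reach the fixpoint (proved below).
def pvSucc (diz : List (Int × List Int)) (n : Int) : List Int :=
  ((PySem.Dict.ofList diz).get? n).getD []

def pvStep (diz : List (Int × List Int)) (s : Finset Int) : Finset Int :=
  s ∪ s.biUnion (fun n => (pvSucc diz n).toFinset)

def pvUniv (diz : List (Int × List Int)) : Finset Int :=
  (diz.map (·.1)).toFinset ∪ (diz.flatMap (·.2)).toFinset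

def pvReach (diz : List (Int × List Int)) (s0 : Finset Int) : Finset Int :=
  (pvStep diz)^[(pvUniv diz ∪ s0).card + 1] s0

-- Pre_trova excludes exactly the inputs with a cycle reachable from x (through keys of
-- diz): there the Python A raises RecursionError (and B does not return either).
def Pre_trova (diz : List (Int × List Int)) (x : Int) : Prop :=
  ∀ k ∈ pvReach diz {x}, k ∉ pvReach diz (pvSucc diz k).toFinset

instance (diz : List (Int × List Int)) (x : Int) : Decidable (Pre_trova diz x) := by
  unfold Pre_trova; infer_instance

def pvWitness_trova : (List (Int × List Int)) × Int := ([(1, [2, 3]), (2, [3]), (3, [])], 1)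

def Spec_trova (diz : List (Int × List Int)) (x : Int) (out : List (Int × List Int)) : Prop := out = trova_alt diz x
instance (diz : List (Int × List Int)) (x : Int) (out : List (Int × List Int)) : Decidable (Spec_trova diz x out) := by unfold Spec_trova; infer_instance

-- ===== CLAIM (what is proved, stated in full; the proofs are below) =====
def Claim_equal_trova : Prop := ∀ (diz : List (Int × List Int)) (x : Int), Dom_trova diz x → Pre_trova diz x → Spec_trova diz x (trova diz x)

-- ===== LEMMAS AND PROOFS =====

-- == reachability ==

theorem pv_subset_step (diz : List (Int × List Int)) (s : Finset Int) : s ⊆ pvStep diz s := by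
  unfold pvStep; exact Finset.subset_union_left

theorem pv_step_mono (diz : List (Int × List Int)) {s t : Finset Int} (h : s ⊆ t) :
    pvStep diz s ⊆ pvStep diz t := by
  unfold pvStep
  exact Finset.union_subset_union h (Finset.biUnion_subset_biUnion_of_subset_left _ h)

theorem pv_iterate_le (diz : List (Int × List Int)) {j k : Nat} (h : j ≤ k) (s : Finset Int) :
    (pvStep diz)^[j] s ⊆ (pvStep diz)^[k] s := by
  obtain ⟨m, rfl⟩ := Nat.exists_eq_add_of_le h
  induction m with
  | zero => simp
  | succ m ih =>
      calc (pvStep diz)^[j] s ⊆ (pvStep diz)^[j + m] s := ih (Nat.le_add_right _ _)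
        _ ⊆ (pvStep diz)^[j + (m+1)] s := by
              rw [show j + (m+1) = (j+m) + 1 from rfl, Function.iterate_succ_apply']
              exact pv_subset_step diz _

-- values of the dict come from pairs of diz
theorem pv_mem_items_update {p : Int × List Int} {d : PySem.Dict Int (List Int)}
    {ps : List (Int × List Int)}
    (h : p ∈ (d.update ps).items) : p ∈ d.items ∨ p ∈ ps := by
  induction ps generalizing d with
  | nil => exact Or.inl h
  | cons q ps ih =>
      have := ih (d := d.insert q.1 q.2) h
      rcases this with h' | h'
      · rw [PySem.Dict.mem_items_insert] at h'
        rcases h' with h' | h'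
        · right; rw [h']; simp
        · exact Or.inl h'.1
      · right; right; exact h'
theorem pv_mem_items_ofList {p : Int × List Int} {ps : List (Int × List Int)}
    (h : p ∈ (PySem.Dict.ofList ps).items) : p ∈ ps := by
  have : PySem.Dict.ofList ps = PySem.Dict.update PySem.Dict.empty ps := rfl
  rw [this] at h
  rcases pv_mem_items_update h with h' | h'
  · simp [PySem.Dict.empty] at h'
  · exact h'


theorem pv_succ_subset_univ (diz : List (Int × List Int)) (n : Int) :
    (pvSucc diz n).toFinset ⊆ pvUniv diz := by
  intro a ha
  simp only [List.mem_toFinset] at ha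
  unfold pvSucc at ha
  cases hg : (PySem.Dict.ofList diz).get? n with
  | none => rw [hg] at ha; simp at ha
  | some l =>
      rw [hg] at ha; simp at ha
      have hm : (n, l) ∈ (PySem.Dict.ofList diz).items := PySem.Dict.mem_items_of_get?_eq_some _ hg
      have : (n, l) ∈ diz := pv_mem_items_ofList hm
      unfold pvUniv
      refine Finset.mem_union_right _ ?_
      simp only [List.mem_toFinset, List.mem_flatMap]
      exact ⟨(n, l), this, ha⟩

theorem pv_step_subset_univ (diz : List (Int × List Int)) {s u : Finset Int}
    (hu : pvUniv diz ⊆ u) (h : s ⊆ u) : pvStep diz s ⊆ u := by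
  unfold pvStep
  refine Finset.union_subset h (Finset.biUnion_subset.2 ?_)
  intro n _; exact (pv_succ_subset_univ diz n).trans hu

theorem pv_iterate_subset_univ (diz : List (Int × List Int)) (k : Nat) (s0 : Finset Int) :
    (pvStep diz)^[k] s0 ⊆ pvUniv diz ∪ s0 := by
  induction k with
  | zero => simpa using Finset.subset_union_right
  | succ k ih =>
      rw [Function.iterate_succ_apply']
      exact pv_step_subset_univ diz Finset.subset_union_left ih

theorem pv_reach_fix (diz : List (Int × List Int)) (s0 : Finset Int) :
    pvStep diz (pvReach diz s0) = pvReach diz s0 := by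
  set F := pvStep diz with hF
  set N := (pvUniv diz ∪ s0).card + 1 with hN
  -- there is a stabilization index k < N
  have hstab : ∃ k < N, F (F^[k] s0) = F^[k] s0 := by
    by_contra hcon
    push_neg at hcon
    have grow : ∀ n ≤ N, s0.card + n ≤ (F^[n] s0).card := by
      intro n hn
      induction n with
      | zero => simp
      | succ n ih =>
          have h1 : F^[n] s0 ⊂ F^[n+1] s0 := by
            rw [Function.iterate_succ_apply']
            exact (pv_subset_step diz _).ssubset_of_ne
              (fun h => hcon n (Nat.lt_of_succ_le hn) h.symm)
          have := Finset.card_lt_card h1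
          have := ih (Nat.le_of_succ_le hn)
          omega
      -- oops: goal naming; fix below if needed
    have h1 := grow N le_rfl
    have h2 : (F^[N] s0).card ≤ (pvUniv diz ∪ s0).card :=
      Finset.card_le_card (pv_iterate_subset_univ diz N s0)
    omega
  obtain ⟨k, hk, hfix⟩ := hstab
  have stable : ∀ j, F^[k + j] s0 = F^[k] s0 := by
    intro j
    induction j with
    | zero => rfl
    | succ j ih => rw [show k + (j+1) = (k+j) + 1 from rfl, Function.iterate_succ_apply', ih, hfix]
  have hNk : F^[N] s0 = F^[k] s0 := by
    have := stable (N - k); rwa [Nat.add_sub_cancel' (Nat.le_of_lt hk)] at this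
  show F (F^[N] s0) = F^[N] s0
  rw [hNk, hfix]

theorem pv_subset_reach (diz : List (Int × List Int)) (s0 : Finset Int) : s0 ⊆ pvReach diz s0 :=
  pv_iterate_le diz (Nat.zero_le _) s0

theorem pv_reach_min (diz : List (Int × List Int)) {s0 C : Finset Int}
    (h0 : s0 ⊆ C) (hC : pvStep diz C ⊆ C) : pvReach diz s0 ⊆ C := by
  unfold pvReach
  generalize (pvUniv diz ∪ s0).card + 1 = k
  induction k with
  | zero => simpa using h0
  | succ k ih => rw [Function.iterate_succ_apply']
                 exact ((pv_step_mono diz ih).trans hC)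

theorem pv_reach_closed (diz : List (Int × List Int)) {s0 : Finset Int} {y : Int}
    (hy : y ∈ pvReach diz s0) : (pvSucc diz y).toFinset ⊆ pvReach diz s0 := by
  intro a ha
  have : a ∈ pvStep diz (pvReach diz s0) := by
    unfold pvStep
    exact Finset.mem_union_right _ (Finset.mem_biUnion.2 ⟨y, hy, ha⟩)
  rwa [pv_reach_fix diz s0] at this

theorem pv_reach_singleton_subset (diz : List (Int × List Int)) {s0 : Finset Int} {i : Int}
    (hi : i ∈ pvReach diz s0) : pvReach diz {i} ⊆ pvReach diz s0 :=
  pv_reach_min diz (Finset.singleton_subset_iff.2 hi)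
    (le_of_eq (pv_reach_fix diz s0))

-- keys
theorem pv_contains_iff (diz : List (Int × List Int)) (k : Int) :
    (PySem.Dict.ofList diz).contains k = true ↔ k ∈ (diz.map (·.1)).toFinset := by
  rw [PySem.Dict.contains_iff_mem_keys]
  have h1 : PySem.Dict.ofList diz
      = diz.foldl (fun d p => d.insert p.1 p.2) PySem.Dict.empty := rfl
  rw [h1, PySem.Dict.keys_foldl_insert_key diz Prod.fst _ PySem.Dict.empty]
  simp [PySem.Dict.keys_empty, PySem.Set.update_nil_left, PySem.Set.mem_ofList]

-- the measure: number of keys reachable from y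
def pvMu (diz : List (Int × List Int)) (y : Int) : Nat :=
  (pvReach diz {y} ∩ (diz.map (·.1)).toFinset).card

theorem pv_mu_le (diz : List (Int × List Int)) (y : Int) : pvMu diz y ≤ diz.length := by
  calc (pvReach diz {y} ∩ (diz.map (·.1)).toFinset).card
      ≤ ((diz.map (·.1)).toFinset).card := Finset.card_le_card Finset.inter_subset_right
    _ ≤ (diz.map (·.1)).length := List.toFinset_card_le _
    _ = diz.length := List.length_map ..

theorem pv_mu_pos (diz : List (Int × List Int)) {y : Int}
    (hk : (PySem.Dict.ofList diz).contains y = true) : 1 ≤ pvMu diz y := by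
  have hy : y ∈ pvReach diz {y} ∩ (diz.map (·.1)).toFinset :=
    Finset.mem_inter.2 ⟨pv_subset_reach diz {y} (Finset.mem_singleton_self y),
      (pv_contains_iff diz y).1 hk⟩
  exact Finset.card_pos.2 ⟨y, hy⟩

-- under Pre_, a child of a reachable key has strictly smaller measure
theorem pv_mu_child_lt (diz : List (Int × List Int)) {x y i : Int}
    (pre : Pre_trova diz x) (hyR : y ∈ pvReach diz {x})
    (hk : (PySem.Dict.ofList diz).contains y = true)
    (hi : i ∈ pvSucc diz y) : pvMu diz i < pvMu diz y := by
  have hiy : i ∈ pvReach diz {y} :=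
    pv_reach_closed diz (pv_subset_reach diz {y} (Finset.mem_singleton_self y))
      (List.mem_toFinset.2 hi)
  have hsub : pvReach diz {i} ⊆ pvReach diz {y} := pv_reach_singleton_subset diz hiy
  have hchild : pvReach diz {i} ⊆ pvReach diz (pvSucc diz y).toFinset :=
    pv_reach_min diz (Finset.singleton_subset_iff.2 (pv_subset_reach diz _ (List.mem_toFinset.2 hi)))
      (le_of_eq (pv_reach_fix diz _))
  have hyni : y ∉ pvReach diz {i} := fun h => pre y hyR (hchild h)
  refine Finset.card_lt_card ((Finset.ssubset_iff_of_subset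
      (Finset.inter_subset_inter hsub (Finset.Subset.refl _))).2
    ⟨y, Finset.mem_inter.2 ⟨pv_subset_reach diz {y} (Finset.mem_singleton_self y),
        (pv_contains_iff diz y).1 hk⟩,
      fun h => hyni (Finset.mem_inter.1 h).1⟩)

-- children of a node reachable from x stay reachable from x
theorem pv_child_mem_R (diz : List (Int × List Int)) {x y i : Int}
    (hyR : y ∈ pvReach diz {x}) (hi : i ∈ pvSucc diz y) : i ∈ pvReach diz {x} :=
  pv_reach_closed diz hyR (List.mem_toFinset.2 hi)

-- == dict-merge lemmas ==

theorem pv_update_append (d : PySem.Dict Int (List Int)) (ps qs : List (Int × List Int)) :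
    d.update (ps ++ qs) = (d.update ps).update qs := by
  unfold PySem.Dict.update; rw [List.foldl_append]

theorem pv_insert_comm_of_contains (D : PySem.Dict Int (List Int)) {k k1 : Int}
    (v w1 : List Int) (hk : D.contains k = true) (hne : k1 ≠ k) :
    (D.insert k1 w1).insert k v = (D.insert k v).insert k1 w1 := by
  apply PySem.Dict.ext
  have hk' : (D.insert k1 w1).contains k = true := by
    rw [PySem.Dict.contains_insert]; simp [hk]
  by_cases h1 : D.contains k1 = true
  · have h1' : (D.insert k v).contains k1 = true := by
      rw [PySem.Dict.contains_insert]; simp [h1]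
    rw [PySem.Dict.items_insert_of_contains _ v hk',
        PySem.Dict.items_insert_of_contains _ w1 h1,
        PySem.Dict.items_insert_of_contains _ w1 h1',
        PySem.Dict.items_insert_of_contains _ v hk,
        List.map_map, List.map_map]
    apply List.map_congr_left
    intro p _
    by_cases hp1 : p.1 = k1 <;> by_cases hp2 : p.1 = k <;>
      simp [Function.comp, hp1, hp2, hne, Ne.symm hne]
  · have h1n : D.contains k1 = false := by simpa using h1
    have h1' : (D.insert k v).contains k1 = false := by
      rw [PySem.Dict.contains_insert]; simp [h1n, hne]
    rw [PySem.Dict.items_insert_of_contains _ v hk',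
        PySem.Dict.items_insert_of_not_contains _ w1 h1n,
        PySem.Dict.items_insert_of_not_contains _ w1 h1',
        PySem.Dict.items_insert_of_contains _ v hk,
        List.map_append]
    simp only [List.map_cons, List.map_nil]
    have : ((k1 : Int) == k) = false := by simp [hne]
    simp [this]

-- inserting k (already present) commutes with updating by pairs whose keys avoid k
theorem pv_update_insert_of_contains {k : Int} (v : List Int) :
    ∀ (ps : List (Int × List Int)) (D : PySem.Dict Int (List Int)),
      D.contains k = true → k ∉ ps.map Prod.fst →
      (D.update ps).insert k v = (D.insert k v).update ps := by
  intro ps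
  induction ps with
  | nil => intro D _ _; rfl
  | cons q ps ih =>
      intro D hk hnk
      simp only [List.map_cons, List.mem_cons] at hnk
      push_neg at hnk
      obtain ⟨hq, hps⟩ := hnk
      show ((D.insert q.1 q.2).update ps).insert k v = ((D.insert k v).insert q.1 q.2).update ps
      rw [ih (D.insert q.1 q.2) (by rw [PySem.Dict.contains_insert]; simp [hk]) hps,
          pv_insert_comm_of_contains D v q.2 hk (fun h => hq h.symm)]

-- updating with an items list whose k-entry is overwritten = update then insert k v
theorem pv_update_map_overwrite {k : Int} (v : List Int) :
    ∀ (ps : List (Int × List Int)) (d2 : PySem.Dict Int (List Int)),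
      (ps.map Prod.fst).Nodup → k ∈ ps.map Prod.fst →
      d2.update (ps.map (fun p => if (p.1 == k) = true then (k, v) else p))
        = (d2.update ps).insert k v := by
  intro ps
  induction ps with
  | nil => intro d2 _ h; simp at h
  | cons q ps ih =>
      intro d2 hnd hmem
      simp only [List.map_cons, List.nodup_cons] at hnd
      by_cases hq : q.1 = k
      · have hfq : (fun p => if ((p.1 : Int) == k) = true then (k, v) else p) q = (k, v) := by
          simp [hq]
        have hknps : k ∉ ps.map Prod.fst := by rw [← hq]; exact hnd.1
        have hmap : ps.map (fun p => if ((p.1 : Int) == k) = true then (k, v) else p) = ps := by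
          conv_rhs => rw [← List.map_id ps]
          apply List.map_congr_left
          intro p hp
          have hp1 : p.1 ≠ k := fun h => hknps (h ▸ List.mem_map_of_mem hp)
          simp [hp1]
        simp only [List.map_cons, hfq]
        show PySem.Dict.update (d2.insert k v) (ps.map _) = ((d2.insert q.1 q.2).update ps).insert k v
        rw [hmap, hq]
        rw [pv_update_insert_of_contains v ps (d2.insert k q.2)
              (by rw [PySem.Dict.contains_insert]; simp) hknps,
            PySem.Dict.insert_insert_self]
      · have hmem' : k ∈ ps.map Prod.fst := by
          rcases List.mem_cons.1 hmem with h | h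
          · exact absurd h.symm hq
          · exact h
        have hfq : (fun p => if ((p.1 : Int) == k) = true then (k, v) else p) q = q := by
          have : ((q.1 : Int) == k) = false := by simp [hq]
          simp [this]
        simp only [List.map_cons, hfq]
        exact ih (d2.insert q.1 q.2) hnd.2 hmem'

-- merge associativity, single-insert form
theorem pv_M2 (d2 a : PySem.Dict Int (List Int)) (k : Int) (v : List Int)
    (hnd : a.keys.Nodup) :
    d2.update ((a.insert k v).items) = (d2.update a.items).insert k v := by
  by_cases hk : a.contains k = true
  · rw [PySem.Dict.items_insert_of_contains _ v hk]
    exact pv_update_map_overwrite v a.items d2 hnd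
      ((PySem.Dict.contains_iff_mem_keys a k).1 hk)
  · rw [PySem.Dict.items_insert_of_not_contains _ v (by simpa using hk),
        pv_update_append]
    rfl

-- merge associativity
theorem pv_M1 (r : List (Int × List Int)) :
    ∀ (a d2 : PySem.Dict Int (List Int)), a.keys.Nodup →
      d2.update ((a.update r).items) = (d2.update a.items).update r := by
  induction r with
  | nil => intro a d2 _; rfl
  | cons p r ih =>
      intro a d2 hnd
      show d2.update (((a.insert p.1 p.2).update r).items)
        = ((d2.update a.items).insert p.1 p.2).update r
      rw [ih (a.insert p.1 p.2) d2 (PySem.Dict.nodup_keys_insert a p.1 p.2 hnd),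
          pv_M2 d2 a p.1 p.2 hnd]

theorem pv_M0 (d2 : PySem.Dict Int (List Int)) (y : Int) (l : List Int) :
    d2.update ((PySem.Dict.empty.insert y l).items) = d2.insert y l := by
  rfl

-- merge associativity through a fold of merges
theorem pv_Mchain (f : Int → PySem.Dict Int (List Int)) (l : List Int) :
    ∀ (a acc : PySem.Dict Int (List Int)), a.keys.Nodup →
      acc.update ((l.foldl (fun b j => b.update (f j).items) a).items)
        = l.foldl (fun b j => b.update (f j).items) (acc.update a.items) := by
  induction l with
  | nil => intro a acc _; rfl
  | cons j l ih =>
      intro a acc hnd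
      show acc.update ((l.foldl _ (a.update (f j).items)).items)
        = l.foldl _ ((acc.update a.items).update (f j).items)
      rw [ih (a.update (f j).items) acc (PySem.Dict.nodup_keys_update a _ hnd),
          pv_M1 (f j).items a acc hnd]

-- == equation lemmas for the ports ==
theorem pv_A_notkey (d : PySem.Dict Int (List Int)) {y : Int}
    (hk : d.contains y = false) : ∀ f, trovaA d f y = PySem.Dict.empty := by
  intro f
  cases f with
  | zero => rfl
  | succ f => simp [trovaA, hk]

theorem pv_trovaA_succ_key (d : PySem.Dict Int (List Int)) {y : Int} (f : Nat)
    (hk : d.contains y = true) :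
    trovaA d (f + 1) y
      = ((d.get? y).getD []).foldl (fun acc i => acc.update (trovaA d f i).items)
          (PySem.Dict.empty.insert y ((d.get? y).getD [])) := by
  show (if d.contains y then _ else _) = _
  rw [if_pos hk]
  by_cases hl : ((d.get? y).getD []).length > 0
  · simp only [hl, if_true]
  · have : (d.get? y).getD [] = [] := by
      cases h : (d.get? y).getD [] with
      | nil => rfl
      | cons a l => rw [h] at hl; simp at hl
    simp only [this]
    rfl

theorem pv_loop_notkey (d : PySem.Dict Int (List Int)) {i : Int} (m : Nat)
    (s : List Int) (acc : PySem.Dict Int (List Int)) (hk : d.contains i = false) :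
    trovaBLoop d (m + 1) (i :: s) acc = trovaBLoop d m s acc := by
  simp [trovaBLoop, hk]

theorem pv_loop_key (d : PySem.Dict Int (List Int)) {i : Int} (m : Nat)
    (s : List Int) (acc : PySem.Dict Int (List Int)) (hk : d.contains i = true) :
    trovaBLoop d (m + 1) (i :: s) acc
      = trovaBLoop d m ((d.get? i).getD [] ++ s) (acc.insert i ((d.get? i).getD [])) := by
  simp [trovaBLoop, hk]

theorem pv_loop_nil (d : PySem.Dict Int (List Int)) (m : Nat)
    (acc : PySem.Dict Int (List Int)) : trovaBLoop d m [] acc = acc := by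
  cases m <;> rfl

theorem pv_nodup_foldl_update (g : Int → PySem.Dict Int (List Int)) (l : List Int) :
    ∀ acc : PySem.Dict Int (List Int), acc.keys.Nodup →
      (l.foldl (fun b j => b.update (g j).items) acc).keys.Nodup := by
  induction l with
  | nil => intro acc h; exact h
  | cons j l ih => intro acc h; exact ih _ (PySem.Dict.nodup_keys_update acc _ h)

theorem pv_nodup_empty_insert (y : Int) (l : List Int) :
    (PySem.Dict.empty.insert y l).keys.Nodup :=
  PySem.Dict.nodup_keys_insert _ y l (by rw [PySem.Dict.keys_empty]; exact List.nodup_nil)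

theorem pv_nodup_trovaA (d : PySem.Dict Int (List Int)) : ∀ (f : Nat) (y : Int),
    (trovaA d f y).keys.Nodup := by
  intro f
  induction f with
  | zero => intro y; rw [show trovaA d 0 y = PySem.Dict.empty from rfl,
              PySem.Dict.keys_empty]; exact List.nodup_nil
  | succ f ih =>
      intro y
      by_cases hk : d.contains y = true
      · rw [pv_trovaA_succ_key d f hk]
        exact pv_nodup_foldl_update _ _ _ (pv_nodup_empty_insert y _)
      · rw [pv_A_notkey d (by simpa using hk) (f+1), PySem.Dict.keys_empty]
        exact List.nodup_nil

-- == fuel irrelevance for the port of A ==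
theorem pv_A_fuel (diz : List (Int × List Int)) (x : Int) (pre : Pre_trova diz x) :
    ∀ n y, y ∈ pvReach diz {x} → pvMu diz y ≤ n →
      ∀ f g, pvMu diz y ≤ f → pvMu diz y ≤ g →
        trovaA (PySem.Dict.ofList diz) f y = trovaA (PySem.Dict.ofList diz) g y := by
  intro n
  induction n using Nat.strong_induction_on with
  | _ n ih =>
    intro y hyR hyn f g hf hg
    by_cases hk : (PySem.Dict.ofList diz).contains y = true
    · have hmu : 1 ≤ pvMu diz y := pv_mu_pos diz hk
      cases f with
      | zero => omega
      | succ f => cases g with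
        | zero => omega
        | succ g =>
            rw [pv_trovaA_succ_key _ f hk, pv_trovaA_succ_key _ g hk]
            apply PySem.List.foldl_congr_mem
            intro acc i hi
            have hi' : i ∈ pvSucc diz y := hi
            have hlt : pvMu diz i < pvMu diz y := pv_mu_child_lt diz pre hyR hk hi'
            have := ih (pvMu diz i) (by omega) i (pv_child_mem_R diz hyR hi') le_rfl
              f g (by omega) (by omega)
            rw [this]
    · rw [pv_A_notkey _ (by simpa using hk) f, pv_A_notkey _ (by simpa using hk) g]

theorem pv_succ_len_le (diz : List (Int × List Int)) (i : Int) :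
    (pvSucc diz i).length ≤ (diz.map (fun p => p.2.length)).sum := by
  unfold pvSucc
  cases h : (PySem.Dict.ofList diz).get? i with
  | none => simp
  | some l =>
      simp only [Option.getD_some]
      have hmem : (i, l) ∈ diz :=
        pv_mem_items_ofList (PySem.Dict.mem_items_of_get?_eq_some _ h)
      have : l.length ∈ diz.map (fun p => p.2.length) := List.mem_map.2 ⟨(i, l), hmem, rfl⟩
      exact List.single_le_sum (fun _ _ => Nat.zero_le _) _ this

-- == the stack loop of B simulates A's recursion, with an explicit fuel bound ==
theorem pv_B_steps (diz : List (Int × List Int)) (x : Int) (pre : Pre_trova diz x) :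
    ∀ n (l : List Int), (∀ i ∈ l, i ∈ pvReach diz {x} ∧ pvMu diz i ≤ n) →
      ∃ g, g ≤ l.length * ((diz.map (fun p => p.2.length)).sum + 2) ^ (n + 1) ∧
        ∀ (acc : PySem.Dict Int (List Int)) (rest : List Int) (h : Nat),
          trovaBLoop (PySem.Dict.ofList diz) (g + h) (l ++ rest) acc
            = trovaBLoop (PySem.Dict.ofList diz) h rest
                (l.foldl (fun b i =>
                  b.update (trovaA (PySem.Dict.ofList diz) (pvMu diz i) i).items) acc) := by
  intro n
  induction n using Nat.strong_induction_on with
  | _ n ih =>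
    intro l
    induction l with
    | nil => exact fun _ => ⟨0, by simp, fun acc rest h => by simp⟩
    | cons i l' ihl =>
        intro hl
        obtain ⟨hiR, hin⟩ := hl i (List.mem_cons_self ..)
        obtain ⟨g2, hg2, H2⟩ := ihl (fun j hj => hl j (List.mem_cons_of_mem _ hj))
        have hB : 1 ≤ ((diz.map (fun p => p.2.length)).sum + 2) ^ (n + 1) :=
          Nat.one_le_pow _ _ (by omega)
        by_cases hk : (PySem.Dict.ofList diz).contains i = true
        · -- i is a key: pop it, write it, push its children
          have hmu1 : 1 ≤ pvMu diz i := pv_mu_pos diz hk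
          have hn1 : 1 ≤ n := le_trans hmu1 hin
          have hch : ∀ j ∈ pvSucc diz i,
              j ∈ pvReach diz {x} ∧ pvMu diz j ≤ n - 1 := by
            intro j hj
            have := pv_mu_child_lt diz pre hiR hk hj
            exact ⟨pv_child_mem_R diz hiR hj, by omega⟩
          obtain ⟨g1, hg1, H1⟩ := ih (n - 1) (by omega) (pvSucc diz i) hch
          rw [show n - 1 + 1 = n by omega] at hg1
          have hli : (pvSucc diz i).length ≤ (diz.map (fun p => p.2.length)).sum :=
            pv_succ_len_le diz i
          refine ⟨1 + g1 + g2, ?_, ?_⟩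
          · -- fuel bound
            set S := (diz.map (fun p => p.2.length)).sum with hS
            have hP : 1 ≤ (S + 2) ^ n := Nat.one_le_pow _ _ (by omega)
            have e1 : (S + 2) ^ (n + 1) = (S + 2) ^ n * (S + 2) := pow_succ _ _
            have e2 : g1 ≤ S * (S + 2) ^ n :=
              le_trans hg1 (Nat.mul_le_mul_right _ hli)
            have e3 : (S + 2) ^ n * (S + 2) = S * (S + 2) ^ n + 2 * (S + 2) ^ n := by ring
            have e4 : (i :: l').length * (S + 2) ^ (n + 1)
                = (S + 2) ^ (n + 1) + l'.length * (S + 2) ^ (n + 1) := by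
              rw [List.length_cons]; ring
            omega
          · intro acc rest h
            rw [show 1 + g1 + g2 + h = (g1 + (g2 + h)) + 1 by omega]
            show trovaBLoop _ ((g1 + (g2 + h)) + 1) (i :: (l' ++ rest)) acc = _
            rw [pv_loop_key _ _ _ _ hk]
            have hsucc : ((PySem.Dict.ofList diz).get? i).getD [] = pvSucc diz i := rfl
            rw [hsucc]
            rw [H1 (acc.insert i (pvSucc diz i)) (l' ++ rest) (g2 + h)]
            rw [H2 _ rest h]
            congr 1
            simp only [List.foldl_cons]
            congr 1
            -- acc.update (trovaA (μ i) i).items = fold of children from acc.insert i children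
            cases hμ : pvMu diz i with
            | zero => omega
            | succ m =>
                rw [pv_trovaA_succ_key _ m hk, hsucc]
                have hconv : (pvSucc diz i).foldl
                    (fun b j => b.update (trovaA (PySem.Dict.ofList diz) m j).items)
                    (PySem.Dict.empty.insert i (pvSucc diz i))
                  = (pvSucc diz i).foldl
                    (fun b j => b.update (trovaA (PySem.Dict.ofList diz) (pvMu diz j) j).items)
                    (PySem.Dict.empty.insert i (pvSucc diz i)) := by
                  apply PySem.List.foldl_congr_mem
                  intro b j hj
                  have hlt := pv_mu_child_lt diz pre hiR hk hj
                  rw [pv_A_fuel diz x pre (pvMu diz j) j (pv_child_mem_R diz hiR hj) le_rfl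
                    m (pvMu diz j) (by omega) le_rfl]
                rw [hconv, pv_Mchain _ _ _ _ (pv_nodup_empty_insert i _), pv_M0]
        · -- i is not a key: pop and skip
          have hkf : (PySem.Dict.ofList diz).contains i = false := by simpa using hk
          have e4 : (i :: l').length * ((diz.map (fun p => p.2.length)).sum + 2) ^ (n + 1)
              = ((diz.map (fun p => p.2.length)).sum + 2) ^ (n + 1)
                + l'.length * ((diz.map (fun p => p.2.length)).sum + 2) ^ (n + 1) := by
            rw [List.length_cons]; ring
          refine ⟨1 + g2, by omega, ?_⟩
          intro acc rest h
          rw [show 1 + g2 + h = (g2 + h) + 1 by omega]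
          show trovaBLoop _ ((g2 + h) + 1) (i :: (l' ++ rest)) acc = _
          rw [pv_loop_notkey _ _ _ _ hkf, H2 acc rest h]
          simp only [List.foldl_cons]
          rw [pv_A_notkey _ hkf]
          rfl

theorem pv_items_update_empty (r : PySem.Dict Int (List Int)) (hnd : r.keys.Nodup) :
    (PySem.Dict.empty.update r.items).items = r.items := by
  have hnd' : (r.items.map Prod.fst).Nodup := hnd
  have hfresh : ∀ a ∈ r.items,
      (PySem.Dict.empty : PySem.Dict Int (List Int)).contains (Prod.fst a) = false := by
    intro a _; exact PySem.Dict.contains_empty _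
  have := PySem.Dict.items_foldl_insert_fresh r.items Prod.fst Prod.snd
    PySem.Dict.empty hfresh hnd'
  simpa using this

-- ===== VERDICT (by name: the statement is the Claim_ definition above) =====
theorem trova_spec : Claim_equal_trova := by
  unfold Claim_equal_trova
  intro diz x _hdom pre
  unfold Spec_trova trova trova_alt
  have hxR : x ∈ pvReach diz {x} := pv_subset_reach diz {x} (Finset.mem_singleton_self x)
  have hA : trovaA (PySem.Dict.ofList diz) (diz.length + 1) x
      = trovaA (PySem.Dict.ofList diz) (pvMu diz x) x :=
    pv_A_fuel diz x pre (pvMu diz x) x hxR le_rfl _ _ (by have := pv_mu_le diz x; omega) le_rfl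
  obtain ⟨g, hg, H⟩ := pv_B_steps diz x pre diz.length [x]
    (by intro i hi; rw [List.mem_singleton] at hi; rw [hi]; exact ⟨hxR, pv_mu_le diz x⟩)
  have hgF : g ≤ pvFuelB diz := by
    have h1 : g ≤ ((diz.map (fun p => p.2.length)).sum + 2) ^ (diz.length + 1) := by
      simpa using hg
    exact le_trans h1 (Nat.pow_le_pow_right (by omega) (by omega))
  have hrun := H PySem.Dict.empty [] (pvFuelB diz - g)
  rw [Nat.add_sub_cancel' hgF] at hrun
  simp only [List.append_nil, List.foldl_cons, List.foldl_nil] at hrun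
  rw [hrun, pv_loop_nil,
      pv_items_update_empty _ (pv_nodup_trovaA (PySem.Dict.ofList diz) _ _), hA]
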